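-- pv_equiv track=rewrite | github.com/aryanduntley/AIProjectManager | mcp-server/database/file_metadata_queries.py | _calculate_impact_level
-- ===== SOURCE A (Python) =====
-- from typing import Dict, List, Any, Optional, Tuple
--
-- def _calculate_impact_level(
--
--     file_path: str,
--     modifications: List[Dict[str, Any]],
--     dependencies: Dict[str, Any]
-- ) -> str:
--     """Calculate impact level (low, medium, high) based on file characteristics."""
--     score = 0
--
--     # Factor in modification frequency
--     if len(modifications) > 10:
--         score += 3
--     elif len(modifications) > 5:
--         score += 2
--     elif len(modifications) > 0:
--         score += 1
--
--     # Factor in dependencies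
--     if len(dependencies.get("dependents", [])) > 10:
--         score += 3
--     elif len(dependencies.get("dependents", [])) > 5:
--         score += 2
--     elif len(dependencies.get("dependents", [])) > 0:
--         score += 1
--
--     # Factor in file type
--     if any(pattern in file_path for pattern in [".config", "package.json", "requirements.txt"]):
--         score += 2
--     elif any(pattern in file_path for pattern in [".test", ".spec", "test_"]):
--         score -= 1
--
--     if score >= 6:
--         return "high"
--     elif score >= 3:
--         return "medium"
--     else:
--         return "low"
-- ===== SOURCE B (Python) =====
-- # Decision-table implementation: bucket each count via a lookup list, then read the
-- # final level directly from a precomputed 3x4x4 decision table -- no score arithmetic.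
--
-- _TIER = [0, 1, 1, 1, 1, 1, 2, 2, 2, 2, 2, 3]  # bucket of min(count, 11)
--
-- # _LEVEL[adj][bm][bd]: adj 0 = neutral file, 1 = config file, 2 = test file
-- _LEVEL = [
--     [["low", "low", "low", "medium"],
--      ["low", "low", "medium", "medium"],
--      ["low", "medium", "medium", "medium"],
--      ["medium", "medium", "medium", "high"]],
--     [["low", "medium", "medium", "medium"],
--      ["medium", "medium", "medium", "high"],
--      ["medium", "medium", "high", "high"],
--      ["medium", "high", "high", "high"]],
--     [["low", "low", "low", "low"],
--      ["low", "low", "low", "medium"],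
--      ["low", "low", "medium", "medium"],
--      ["low", "medium", "medium", "medium"]],
-- ]
--
--
-- def _calculate_impact_level(file_path, modifications, dependencies):
--     """Calculate impact level (low, medium, high) via a precomputed decision table."""
--     bm = _TIER[min(len(modifications), 11)]
--     bd = _TIER[min(len(dependencies.get("dependents", [])), 11)]
--     if any(p in file_path for p in (".config", "package.json", "requirements.txt")):
--         adj = 1
--     elif any(p in file_path for p in (".test", ".spec", "test_")):
--         adj = 2
--     else:
--         adj = 0
--     return _LEVEL[adj][bm][bd]
-- ===== Notes on version B (the rewrite author's own statement) =====
-- stated objective: alternative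
-- what changed: Replaces the additive scoring with score arithmetic entirely by lookups: each count is bucketed through a TIER lookup list (indexed by min(count,11)) and the answer is read directly from a precomputed 3x4x4 decision table indexed by (file-type class, modification bucket, dependents bucket).
import Mathlib
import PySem

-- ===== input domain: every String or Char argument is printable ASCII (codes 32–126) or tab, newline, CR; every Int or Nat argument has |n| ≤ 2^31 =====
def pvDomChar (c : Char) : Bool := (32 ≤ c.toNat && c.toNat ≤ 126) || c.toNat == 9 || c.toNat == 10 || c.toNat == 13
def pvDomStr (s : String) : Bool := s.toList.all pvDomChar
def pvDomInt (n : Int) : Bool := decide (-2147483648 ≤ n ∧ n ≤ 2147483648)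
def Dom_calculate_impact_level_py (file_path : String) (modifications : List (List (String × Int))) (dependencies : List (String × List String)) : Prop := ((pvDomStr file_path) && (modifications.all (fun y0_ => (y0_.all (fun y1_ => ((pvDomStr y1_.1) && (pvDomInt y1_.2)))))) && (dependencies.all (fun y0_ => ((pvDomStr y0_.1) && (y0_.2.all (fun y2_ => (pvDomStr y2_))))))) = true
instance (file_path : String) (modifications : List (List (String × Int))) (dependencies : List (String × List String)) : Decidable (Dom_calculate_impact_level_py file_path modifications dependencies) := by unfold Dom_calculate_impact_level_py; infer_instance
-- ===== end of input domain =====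

-- ===== PORT A =====
-- B replaces A's additive scoring by pure lookups: a bucket list and a precomputed 3x4x4 decision table (alternative structure, same cost).
def calculate_impact_level_py (file_path : String) (modifications : List (List (String × Int))) (dependencies : List (String × List String)) : String :=
  let score : Int := 0
  let score : Int :=
    if modifications.length > 10 then score + 3
    else if modifications.length > 5 then score + 2
    else if modifications.length > 0 then score + 1
    else score
  let score : Int :=
    if ((PySem.Dict.mk dependencies).getD "dependents" []).length > 10 then score + 3
    else if ((PySem.Dict.mk dependencies).getD "dependents" []).length > 5 then score + 2
    else if ((PySem.Dict.mk dependencies).getD "dependents" []).length > 0 then score + 1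
    else score
  let score : Int :=
    if [".config", "package.json", "requirements.txt"].any (fun p => PySem.Str.isIn p file_path) then score + 2
    else if [".test", ".spec", "test_"].any (fun p => PySem.Str.isIn p file_path) then score - 1
    else score
  if score ≥ 6 then "high"
  else if score ≥ 3 then "medium"
  else "low"

-- ===== PORT B =====
def pvTier : List Int := [0, 1, 1, 1, 1, 1, 2, 2, 2, 2, 2, 3]

-- pvLevel[adj][bm][bd]: adj 0 = neutral file, 1 = config file, 2 = test file
def pvLevel : List (List (List String)) :=
  [[["low", "low", "low", "medium"],
    ["low", "low", "medium", "medium"],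
    ["low", "medium", "medium", "medium"],
    ["medium", "medium", "medium", "high"]],
   [["low", "medium", "medium", "medium"],
    ["medium", "medium", "medium", "high"],
    ["medium", "medium", "high", "high"],
    ["medium", "high", "high", "high"]],
   [["low", "low", "low", "low"],
    ["low", "low", "low", "medium"],
    ["low", "low", "medium", "medium"],
    ["low", "medium", "medium", "medium"]]]

def calculate_impact_level_py_alt (file_path : String) (modifications : List (List (String × Int))) (dependencies : List (String × List String)) : String :=
  let bm : Int := (PySem.List.pyGet? pvTier (min (modifications.length : Int) 11)).getD 0
  let bd : Int := (PySem.List.pyGet? pvTier (min (((PySem.Dict.mk dependencies).getD "dependents" []).length : Int) 11)).getD 0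
  let adj : Int :=
    if [".config", "package.json", "requirements.txt"].any (fun p => PySem.Str.isIn p file_path) then 1
    else if [".test", ".spec", "test_"].any (fun p => PySem.Str.isIn p file_path) then 2
    else 0
  ((PySem.List.pyGet? ((PySem.List.pyGet? ((PySem.List.pyGet? pvLevel adj).getD []) bm).getD []) bd).getD "")

-- ===== PRECONDITION & SPEC =====
def Spec_calculate_impact_level_py (file_path : String) (modifications : List (List (String × Int))) (dependencies : List (String × List String)) (out : String) : Prop := out = calculate_impact_level_py_alt file_path modifications dependencies
instance (file_path : String) (modifications : List (List (String × Int))) (dependencies : List (String × List String)) (out : String) : Decidable (Spec_calculate_impact_level_py file_path modifications dependencies out) := by unfold Spec_calculate_impact_level_py; infer_instance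

-- ===== CLAIM (what is proved, stated in full; the proofs are below) =====
def Claim_equal_calculate_impact_level_py : Prop := ∀ (file_path : String) (modifications : List (List (String × Int))) (dependencies : List (String × List String)), Dom_calculate_impact_level_py file_path modifications dependencies → Spec_calculate_impact_level_py file_path modifications dependencies (calculate_impact_level_py file_path modifications dependencies)

-- ===== LEMMAS AND PROOFS =====
-- A's ladder value for one count, and A's accumulated score
def pvLadder (n : Nat) : Int := if n > 10 then 3 else if n > 5 then 2 else if n > 0 then 1 else 0

def pvScoreA (m d : Nat) (bc bt : Bool) : Int :=
  let s : Int := 0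
  let s : Int := if m > 10 then s + 3 else if m > 5 then s + 2 else if m > 0 then s + 1 else s
  let s : Int := if d > 10 then s + 3 else if d > 5 then s + 2 else if d > 0 then s + 1 else s
  if bc then s + 2 else if bt then s - 1 else s

def pvDelta (bc bt : Bool) : Int := if bc then 2 else if bt then -1 else 0
def pvAdjIdx (bc bt : Bool) : Int := if bc then 1 else if bt then 2 else 0

def pvTableGet (adj bm bd : Int) : String :=
  ((PySem.List.pyGet? ((PySem.List.pyGet? ((PySem.List.pyGet? pvLevel adj).getD []) bm).getD []) bd).getD "")

set_option maxHeartbeats 1000000 in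
theorem pv_score_eq (m d : Nat) (bc bt : Bool) :
    pvScoreA m d bc bt = pvLadder m + pvLadder d + pvDelta bc bt := by
  cases bc <;> cases bt <;> simp only [pvScoreA, pvLadder, pvDelta] <;> split_ifs <;> omega

theorem pv_tier_eq (n : Nat) :
    (PySem.List.pyGet? pvTier (min (n : Int) 11)).getD 0 = pvLadder n := by
  by_cases h : n ≤ 10
  · have hm : min (n : Int) 11 = (n : Int) := by omega
    rw [hm]
    interval_cases n <;> rfl
  · have hm : min (n : Int) 11 = 11 := by omega
    rw [hm]
    simp only [pvLadder, if_pos (by omega : n > 10)]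
    rfl

theorem pv_ladder_mem (n : Nat) :
    pvLadder n = 0 ∨ pvLadder n = 1 ∨ pvLadder n = 2 ∨ pvLadder n = 3 := by
  simp only [pvLadder]; split_ifs <;> simp

theorem pv_table_eq (bm bd : Int)
    (hm : bm = 0 ∨ bm = 1 ∨ bm = 2 ∨ bm = 3) (hd : bd = 0 ∨ bd = 1 ∨ bd = 2 ∨ bd = 3)
    (bc bt : Bool) :
    pvTableGet (pvAdjIdx bc bt) bm bd =
      (if bm + bd + pvDelta bc bt ≥ 6 then "high"
       else if bm + bd + pvDelta bc bt ≥ 3 then "medium" else "low") := by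
  rcases hm with rfl | rfl | rfl | rfl <;> rcases hd with rfl | rfl | rfl | rfl <;>
    cases bc <;> cases bt <;> rfl

-- ===== VERDICT (by name: the statement is the Claim_ definition above) =====
theorem calculate_impact_level_py_spec : Claim_equal_calculate_impact_level_py := by
  intro fp mods deps _
  unfold Spec_calculate_impact_level_py
  set m := mods.length
  set d := ((PySem.Dict.mk deps).getD "dependents" []).length
  set bc := [".config", "package.json", "requirements.txt"].any (fun p => PySem.Str.isIn p fp) with hbc
  set bt := [".test", ".spec", "test_"].any (fun p => PySem.Str.isIn p fp) with hbt
  have hA : calculate_impact_level_py fp mods deps =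
      (if pvScoreA m d bc bt ≥ 6 then "high"
       else if pvScoreA m d bc bt ≥ 3 then "medium" else "low") := rfl
  have hB : calculate_impact_level_py_alt fp mods deps =
      pvTableGet (pvAdjIdx bc bt)
        ((PySem.List.pyGet? pvTier (min (m : Int) 11)).getD 0)
        ((PySem.List.pyGet? pvTier (min (d : Int) 11)).getD 0) := by
    cases hc : bc <;> cases ht : bt <;>
      simp only [calculate_impact_level_py_alt, pvTableGet, pvAdjIdx, ← hbc, ← hbt, hc, ht] <;> rfl
  rw [hA, hB, pv_tier_eq, pv_tier_eq,
    pv_table_eq _ _ (pv_ladder_mem m) (pv_ladder_mem d) bc bt, pv_score_eq]
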